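-- pv_equiv track=rewrite | github.com/rokaijano/boa-research | examples/tiny_transformer_text/src/text_demo/data.py | _fake_samples
-- ===== SOURCE A (Python) =====
-- def _fake_samples(train_size: int, val_size: int):
--     positive = "team wins championship with dramatic comeback"
--     negative = "company reports lower revenue after weak quarter"
--     science = "researchers discover new particle in collider study"
--     world = "leaders discuss sanctions and diplomatic response"
--     texts = [positive, negative, science, world]
--     labels = [0, 1, 2, 3]
--     train_texts = [texts[index % 4] for index in range(train_size)]
--     train_labels = [labels[index % 4] for index in range(train_size)]
--     val_texts = [texts[index % 4] for index in range(val_size)]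
--     val_labels = [labels[index % 4] for index in range(val_size)]
--     return train_texts, train_labels, val_texts, val_labels
-- ===== SOURCE B (Python) =====
-- def _fake_samples(train_size: int, val_size: int):
--     positive = "team wins championship with dramatic comeback"
--     negative = "company reports lower revenue after weak quarter"
--     science = "researchers discover new particle in collider study"
--     world = "leaders discuss sanctions and diplomatic response"
--     texts = [positive, negative, science, world]
--     labels = [0, 1, 2, 3]
--
--     def cycled(seq, n):
--         if n <= 0:
--             return []
--         full, rest = divmod(n, len(seq))
--         return seq * full + seq[:rest]
--
--     return (cycled(texts, train_size), cycled(labels, train_size),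
--             cycled(texts, val_size), cycled(labels, val_size))
-- ===== Notes on version B (the rewrite author's own statement) =====
-- stated objective: alternative
-- what changed: Replaces the four per-index modulo comprehensions with whole-list replication: divmod(n,4) gives the number of full copies and the remainder, and the result is seq*full + seq[:rest].
import Mathlib
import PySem

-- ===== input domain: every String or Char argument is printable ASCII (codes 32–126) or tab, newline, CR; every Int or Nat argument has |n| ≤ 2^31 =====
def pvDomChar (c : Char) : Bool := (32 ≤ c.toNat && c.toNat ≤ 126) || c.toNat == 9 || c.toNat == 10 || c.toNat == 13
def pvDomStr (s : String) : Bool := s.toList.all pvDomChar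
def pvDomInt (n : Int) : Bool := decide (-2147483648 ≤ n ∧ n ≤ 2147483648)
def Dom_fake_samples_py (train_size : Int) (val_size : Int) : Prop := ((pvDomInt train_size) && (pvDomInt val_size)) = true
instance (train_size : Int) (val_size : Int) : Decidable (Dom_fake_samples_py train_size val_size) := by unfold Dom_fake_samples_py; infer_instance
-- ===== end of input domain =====

-- B builds each list by whole-list replication (divmod full copies + a slice) instead of
-- A's per-index modulo comprehensions; objective: alternative decomposition, same cost.

-- ===== PORT A =====
def fake_samples_py (train_size : Int) (val_size : Int) : List String × List Int × List String × List Int :=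
  let positive := "team wins championship with dramatic comeback"
  let negative := "company reports lower revenue after weak quarter"
  let science := "researchers discover new particle in collider study"
  let world := "leaders discuss sanctions and diplomatic response"
  let texts : List String := [positive, negative, science, world]
  let labels : List Int := [0, 1, 2, 3]
  let train_texts := (PySem.List.pyRange 0 train_size 1).map (fun index => PySem.List.pyGetD texts (PySem.Int.mod index 4) "")
  let train_labels := (PySem.List.pyRange 0 train_size 1).map (fun index => PySem.List.pyGetD labels (PySem.Int.mod index 4) 0)
  let val_texts := (PySem.List.pyRange 0 val_size 1).map (fun index => PySem.List.pyGetD texts (PySem.Int.mod index 4) "")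
  let val_labels := (PySem.List.pyRange 0 val_size 1).map (fun index => PySem.List.pyGetD labels (PySem.Int.mod index 4) 0)
  (train_texts, train_labels, val_texts, val_labels)

-- ===== PORT B =====
-- cycled(seq, n) from Source B: n <= 0 -> []; else seq * full + seq[:rest] with full, rest = divmod(n, len(seq))
def pvCycled {α : Type} (seq : List α) (n : Int) : List α :=
  if n ≤ 0 then []
  else
    let full := PySem.Int.floordiv n ((seq.length : Nat) : Int)
    let rest := PySem.Int.mod n ((seq.length : Nat) : Int)
    (List.replicate full.toNat seq).flatten ++ PySem.List.slice seq none (some rest)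

def fake_samples_py_alt (train_size : Int) (val_size : Int) : List String × List Int × List String × List Int :=
  let positive := "team wins championship with dramatic comeback"
  let negative := "company reports lower revenue after weak quarter"
  let science := "researchers discover new particle in collider study"
  let world := "leaders discuss sanctions and diplomatic response"
  let texts : List String := [positive, negative, science, world]
  let labels : List Int := [0, 1, 2, 3]
  (pvCycled texts train_size, pvCycled labels train_size,
   pvCycled texts val_size, pvCycled labels val_size)

-- ===== PRECONDITION & SPEC =====
def Spec_fake_samples_py (train_size : Int) (val_size : Int) (out : List String × List Int × List String × List Int) : Prop := out = fake_samples_py_alt train_size val_size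
instance (train_size : Int) (val_size : Int) (out : List String × List Int × List String × List Int) : Decidable (Spec_fake_samples_py train_size val_size out) := by unfold Spec_fake_samples_py; infer_instance

-- ===== CLAIM (what is proved, stated in full; the proofs are below) =====
def Claim_equal_fake_samples_py : Prop := ∀ (train_size : Int) (val_size : Int), Dom_fake_samples_py train_size val_size → Spec_fake_samples_py train_size val_size (fake_samples_py train_size val_size)

-- ===== LEMMAS AND PROOFS =====

lemma pvCyc_nat {α : Type} (a b c d dft : α) (k : Nat) :
    (List.range k).map (fun i => List.getD [a, b, c, d] (i % 4) dft)
      = (List.replicate (k / 4) [a, b, c, d]).flatten ++ List.take (k % 4) [a, b, c, d] := by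
  induction k with
  | zero => simp
  | succ k ih =>
    rw [List.range_succ, List.map_append, ih]
    have h4 : k % 4 = 0 ∨ k % 4 = 1 ∨ k % 4 = 2 ∨ k % 4 = 3 := by omega
    rcases h4 with h | h | h | h
    · have h1 : (k + 1) / 4 = k / 4 := by omega
      have h2 : (k + 1) % 4 = 1 := by omega
      simp [h, h1, h2]
    · have h1 : (k + 1) / 4 = k / 4 := by omega
      have h2 : (k + 1) % 4 = 2 := by omega
      simp [h, h1, h2]
    · have h1 : (k + 1) / 4 = k / 4 := by omega
      have h2 : (k + 1) % 4 = 3 := by omega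
      simp [h, h1, h2]
    · have h1 : (k + 1) / 4 = k / 4 + 1 := by omega
      have h2 : (k + 1) % 4 = 0 := by omega
      simp [h, h1, h2, List.replicate_succ', List.flatten_append]

lemma pvCyc_int {α : Type} [Inhabited α] (a b c d dft : α) (n : Int) :
    (PySem.List.pyRange 0 n 1).map (fun i => PySem.List.pyGetD [a, b, c, d] (PySem.Int.mod i 4) dft)
      = pvCycled [a, b, c, d] n := by
  by_cases hn : n ≤ 0
  · rw [PySem.List.pyRange_one_eq_nil (by omega)]
    simp [pvCycled, hn]
  · push Not at hn
    obtain ⟨k, hk⟩ : ∃ k : Nat, n = (k : Int) := ⟨n.toNat, by omega⟩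
    subst hk
    have hcomp : ∀ j : Nat,
        PySem.List.pyGetD [a, b, c, d] (PySem.Int.mod (0 + (j : Int)) 4) dft
          = List.getD [a, b, c, d] (j % 4) dft := by
      intro j
      have : ((4 : Int)) = ((4 : Nat) : Int) := by norm_num
      rw [zero_add, this, PySem.Int.mod_natCast, PySem.List.pyGetD_natCast]
    rw [PySem.List.pyRange_one, List.map_map]
    simp only [Function.comp_def, hcomp]
    rw [show ((k : Int) - 0).toNat = k by omega, pvCyc_nat]
    have h4 : ((4 : Int)) = ((4 : Nat) : Int) := by norm_num
    simp only [pvCycled, List.length_cons, List.length_nil]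
    rw [if_neg (by omega)]
    have hlen : (((0 + 1 + 1 + 1 + 1 : Nat)) : Int) = ((4 : Nat) : Int) := by norm_num
    rw [hlen, PySem.Int.floordiv_natCast, PySem.Int.mod_natCast,
        PySem.List.slice_to_natCast, Int.toNat_natCast]

-- ===== VERDICT (by name: the statement is the Claim_ definition above) =====
theorem fake_samples_py_spec : Claim_equal_fake_samples_py := by
  intro train_size val_size _
  unfold Spec_fake_samples_py fake_samples_py fake_samples_py_alt
  dsimp only
  rw [pvCyc_int, pvCyc_int, pvCyc_int, pvCyc_int]
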